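-- pv_equiv track=rewrite | github.com/alok/ACL2Lean | scripts/acl2_hint_bridge.py | collect_induction_blocks
-- ===== SOURCE A (Python) =====
-- def collect_induction_blocks(lines: list[str]) -> list[str]:
--     blocks: list[str] = []
--     i = 0
--     while i < len(lines):
--         if lines[i].startswith("We will induct according to"):
--             block = [lines[i].rstrip()]
--             j = i + 1
--             while j < len(lines):
--                 line = lines[j].rstrip()
--                 if not line:
--                     if j + 1 < len(lines) and not lines[j + 1].strip():
--                         break
--                     block.append(line)
--                     j += 1
--                     continue
--                 if line.startswith("Subgoal ") or line.startswith("*1 is COMPLETED!") or line.startswith("Q.E.D."):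
--                     break
--                 block.append(line)
--                 j += 1
--             blocks.append("\n".join(block).strip())
--             i = j
--         i += 1
--     return blocks
-- ===== SOURCE B (Python) =====
-- def collect_induction_blocks(lines: list[str]) -> list[str]:
--     # Flat state-machine fold over (line, next-line) pairs: no nested loops, no index jumps.
--     blocks: list[str] = []
--     current = None
--     for line, nxt in zip(lines, [*lines[1:], None]):
--         r = line.rstrip()
--         if current is None:
--             if line.startswith("We will induct according to"):
--                 current = [r]
--         elif r == "":
--             if nxt is not None and nxt.strip() == "":
--                 blocks.append("\n".join(current).strip())
--                 current = None
--             else: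
--                 current.append(r)
--         elif r.startswith(("Subgoal ", "*1 is COMPLETED!", "Q.E.D.")):
--             blocks.append("\n".join(current).strip())
--             current = None
--         else:
--             current.append(r)
--     if current is not None:
--         blocks.append("\n".join(current).strip())
--     return blocks
-- ===== Notes on version B (the rewrite author's own statement) =====
-- stated objective: alternative
-- what changed: B replaces A's nested while loops with index jumps (i = j + 1) by a single flat fold over (line, next-line) pairs carrying an Optional accumulator `current`: a state machine that starts a block on a header, appends or finalizes per line, and flushes the open block after the loop.
import Mathlib
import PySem

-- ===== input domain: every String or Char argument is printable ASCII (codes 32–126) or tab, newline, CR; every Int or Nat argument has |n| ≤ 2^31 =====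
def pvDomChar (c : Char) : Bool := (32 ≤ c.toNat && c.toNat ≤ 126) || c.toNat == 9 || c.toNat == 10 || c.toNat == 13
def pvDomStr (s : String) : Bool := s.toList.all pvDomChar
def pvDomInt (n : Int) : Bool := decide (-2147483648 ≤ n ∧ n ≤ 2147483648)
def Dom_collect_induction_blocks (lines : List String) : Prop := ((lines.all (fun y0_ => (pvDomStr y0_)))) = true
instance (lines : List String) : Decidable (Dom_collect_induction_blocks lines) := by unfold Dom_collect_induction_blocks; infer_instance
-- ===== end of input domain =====

-- B replaces A's nested while loops with a single flat fold over (line, next-line)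
-- pairs carrying an optional accumulator (objective: alternative decomposition).

-- ===== PORT A =====
-- inner while loop of A: scans from j, accumulating rstripped lines into `block`,
-- returns (block, j) at the break/exhaustion point
def pvInnerA (lines : List String) (j : Nat) (block : List String) : List String × Nat :=
  if j < lines.length then
    let line := PySem.Str.rstrip (lines.getD j "")
    if line = "" then
      if j + 1 < lines.length ∧ PySem.Str.strip (lines.getD (j + 1) "") = "" then
        (block, j)
      else pvInnerA lines (j + 1) (block ++ [line])
    else if PySem.Str.startswith line "Subgoal " || PySem.Str.startswith line "*1 is COMPLETED!" || PySem.Str.startswith line "Q.E.D." then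
      (block, j)
    else pvInnerA lines (j + 1) (block ++ [line])
  else (block, j)
termination_by lines.length - j
decreasing_by
  · exact Nat.sub_succ_lt_self _ _ (by assumption)
  · exact Nat.sub_succ_lt_self _ _ (by assumption)

-- termination helper for the outer loop of A (cited in decreasing_by)
theorem pvInnerA_ge (lines : List String) (j : Nat) (block : List String) :
    j ≤ (pvInnerA lines j block).2 := by
  fun_induction pvInnerA lines j block with
  | case1 => exact Nat.le_refl _
  | case2 _ _ _ _ _ _ ih => exact Nat.le_of_succ_le ih
  | case3 => exact Nat.le_refl _
  | case4 _ _ _ _ _ _ ih => exact Nat.le_of_succ_le ih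
  | case5 => exact Nat.le_refl _

-- outer while loop of A
def pvOuterA (lines : List String) (i : Nat) (blocks : List String) : List String :=
  if h : i < lines.length then
    if PySem.Str.startswith (lines.getD i "") "We will induct according to" then
      let p := pvInnerA lines (i + 1) [PySem.Str.rstrip (lines.getD i "")]
      pvOuterA lines (p.2 + 1) (blocks ++ [PySem.Str.strip (PySem.Str.join "\n" p.1)])
    else pvOuterA lines (i + 1) blocks
  else blocks
termination_by lines.length - i
decreasing_by
  · exact Nat.sub_lt_sub_left (by assumption)
      (Nat.lt_succ_of_lt (pvInnerA_ge lines (i + 1) [PySem.Str.rstrip (lines.getD i "")]))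
  · exact Nat.sub_succ_lt_self _ _ (by assumption)

def collect_induction_blocks (lines : List String) : List String :=
  pvOuterA lines 0 []

-- ===== PORT B =====
-- one loop iteration of B's flat state machine: state = (blocks, current)
def pvStepB (st : List String × Option (List String)) (p : String × Option String) :
    List String × Option (List String) :=
  match st.2 with
  | none =>
      if PySem.Str.startswith p.1 "We will induct according to" then
        (st.1, some [PySem.Str.rstrip p.1])
      else st
  | some cur =>
      let r := PySem.Str.rstrip p.1
      if r = "" then
        match p.2 with
        | some nxt =>
            if PySem.Str.strip nxt = "" then
              (st.1 ++ [PySem.Str.strip (PySem.Str.join "\n" cur)], none)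
            else (st.1, some (cur ++ [r]))
        | none => (st.1, some (cur ++ [r]))
      else if PySem.Str.startswith r "Subgoal " || PySem.Str.startswith r "*1 is COMPLETED!" || PySem.Str.startswith r "Q.E.D." then
        (st.1 ++ [PySem.Str.strip (PySem.Str.join "\n" cur)], none)
      else (st.1, some (cur ++ [r]))

-- the (line, next-line) pairs B folds over: zip(lines, [*lines[1:], None])
def pvPairs (lines : List String) : List (String × Option String) :=
  lines.zip ((lines.drop 1).map some ++ [none])

def collect_induction_blocks_alt (lines : List String) : List String :=
  let st := (pvPairs lines).foldl pvStepB ([], none)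
  match st.2 with
  | none => st.1
  | some cur => st.1 ++ [PySem.Str.strip (PySem.Str.join "\n" cur)]

-- ===== PRECONDITION & SPEC =====
def Spec_collect_induction_blocks (lines : List String) (out : List String) : Prop := out = collect_induction_blocks_alt lines
instance (lines : List String) (out : List String) : Decidable (Spec_collect_induction_blocks lines out) := by unfold Spec_collect_induction_blocks; infer_instance

-- ===== CLAIM (what is proved, stated in full; the proofs are below) =====
def Claim_equal_collect_induction_blocks : Prop := ∀ (lines : List String), Dom_collect_induction_blocks lines → Spec_collect_induction_blocks lines (collect_induction_blocks lines)

-- ===== LEMMAS AND PROOFS =====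

-- flushing an open block at the end of B's fold
def pvFinish (st : List String × Option (List String)) : List String :=
  match st.2 with
  | none => st.1
  | some cur => st.1 ++ [PySem.Str.strip (PySem.Str.join "\n" cur)]

theorem pvPairs_length (lines : List String) : (pvPairs lines).length = lines.length := by
  unfold pvPairs
  rcases lines with _ | ⟨a, t⟩ <;> simp

-- the k-th pair is (lines[k], next line if any)
theorem pvPairs_drop (lines : List String) (k : Nat) (hk : k < lines.length) :
    (pvPairs lines).drop k =
      (lines.getD k "",
        if k + 1 < lines.length then some (lines.getD (k + 1) "") else none)
        :: (pvPairs lines).drop (k + 1) := by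
  have hk' : k < (pvPairs lines).length := by rw [pvPairs_length]; exact hk
  rw [List.drop_eq_getElem_cons hk']
  congr 1
  unfold pvPairs
  rw [List.getElem_zip, Prod.mk.injEq]
  refine ⟨?_, ?_⟩
  · exact (List.getD_eq_getElem lines "" hk).symm
  · by_cases h2 : k + 1 < lines.length
    · have : k < ((lines.drop 1).map some).length := by simp; omega
      rw [List.getElem_append_left this]
      simp [h2]
    · have hlen : ((lines.drop 1).map some).length = lines.length - 1 := by simp
      have hke : k = lines.length - 1 := by omega
      rw [List.getElem_append_right (by omega)]
      have hge : lines.length ≤ lines.length - 1 + 1 := by omega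
      simp [hke, hge]

-- the inner loop of A, read as B's fold with an open accumulator
theorem inner_fold (lines : List String) (j : Nat) (block : List String)
    (blocks : List String) :
    List.foldl pvStepB (blocks, some block) ((pvPairs lines).drop j) =
      (let p := pvInnerA lines j block
       if p.2 < lines.length then
         List.foldl pvStepB
           (blocks ++ [PySem.Str.strip (PySem.Str.join "\n" p.1)], none)
           ((pvPairs lines).drop (p.2 + 1))
       else (blocks, some p.1)) := by
  fun_induction pvInnerA lines j block with
  | case1 j block hj line hline hnext =>
    -- blank line, next blank: finalize here, pair j consumed by the step
    rw [pvPairs_drop lines j hj]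
    obtain ⟨hn1, hn2⟩ := hnext
    have e1 : PySem.Str.rstrip (lines[j]'hj) = "" := by
      rw [← List.getD_eq_getElem lines "" hj]; exact hline
    have e2 : PySem.Str.strip (lines[j + 1]'hn1) = "" := by
      rw [← List.getD_eq_getElem lines "" hn1]; exact hn2
    simp only [List.foldl_cons, pvStepB]
    simp [hn1, e1, e2, hj]
  | case2 j block hj line hline hnext ih =>
    rw [pvPairs_drop lines j hj]
    simp only [List.foldl_cons]
    have hstep : pvStepB (blocks, some block)
        (lines.getD j "",
          if j + 1 < lines.length then some (lines.getD (j + 1) "") else none) =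
        (blocks, some (block ++ [line])) := by
      simp only [pvStepB]
      rw [show PySem.Str.rstrip (lines.getD j "") = line from rfl, if_pos hline]
      by_cases h1 : j + 1 < lines.length
      · have h2 : ¬ PySem.Str.strip (lines[j + 1]'h1) = "" := by
          rw [← List.getD_eq_getElem lines "" h1]
          exact fun hb => hnext ⟨h1, hb⟩
        simp [h1, h2]
      · simp [h1]
    rw [hstep, ih]
  | case3 j block hj line hline hpre =>
    rw [pvPairs_drop lines j hj]
    simp only [List.foldl_cons, pvStepB]
    rw [show PySem.Str.rstrip (lines.getD j "") = line from rfl, if_neg hline, if_pos hpre]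
    simp [hj]
  | case4 j block hj line hline hpre ih =>
    rw [pvPairs_drop lines j hj]
    simp only [List.foldl_cons, pvStepB]
    rw [show PySem.Str.rstrip (lines.getD j "") = line from rfl, if_neg hline, if_neg (by simpa using hpre)]
    exact ih
  | case5 j block hj =>
    have hd : (pvPairs lines).drop j = [] :=
      List.drop_eq_nil_of_le (by rw [pvPairs_length]; omega)
    simp [hd, hj]

-- the outer loop of A equals B's fold (with the final flush) over the remaining pairs
theorem outer_fold (lines : List String) (i : Nat) (blocks : List String) :
    pvOuterA lines i blocks =
      pvFinish (List.foldl pvStepB (blocks, none) ((pvPairs lines).drop i)) := by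
  fun_induction pvOuterA lines i blocks with
  | case1 i blocks hi hhdr p ih =>
    rw [pvPairs_drop lines i hi]
    simp only [List.foldl_cons, pvStepB]
    rw [if_pos (by simpa using hhdr)]
    rw [inner_fold lines (i + 1) [PySem.Str.rstrip (lines.getD i "")] blocks]
    have hp : pvInnerA lines (i + 1) [PySem.Str.rstrip (lines.getD i "")] = p := rfl
    rw [hp]
    by_cases hlt : p.2 < lines.length
    · rw [if_pos hlt, ih]
    · rw [if_neg hlt]
      have h2 : ¬ p.2 + 1 < lines.length := by omega
      rw [pvOuterA, dif_neg h2]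
      rfl
  | case2 i blocks hi hhdr ih =>
    rw [pvPairs_drop lines i hi]
    simp only [List.foldl_cons, pvStepB]
    rw [if_neg (by simpa using hhdr)]
    exact ih
  | case3 i blocks hi =>
    have hd : (pvPairs lines).drop i = [] :=
      List.drop_eq_nil_of_le (by rw [pvPairs_length]; omega)
    rw [hd]
    rfl

-- ===== VERDICT (by name: the statement is the Claim_ definition above) =====
theorem collect_induction_blocks_spec : Claim_equal_collect_induction_blocks := by
  intro lines _
  unfold Spec_collect_induction_blocks collect_induction_blocks collect_induction_blocks_alt
  simpa [pvFinish] using outer_fold lines 0 []
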